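-- pv_equiv track=rewrite | github.com/p3dru/ifpi-ads-algoritmos2020 | RackerHank/Xeróqui_e_anagramas.py | saber_se_tem_letras_iguais
-- ===== SOURCE A (Python) =====
-- def saber_se_tem_letras_iguais(string):
--     iguais = posicao = 0
--     for posicao in range(len(string)):
--         letra_setada = string[posicao]
--         nova_string = string[posicao+1:]
--         for letra in nova_string:
--             if letra == letra_setada:
--                 iguais += 1
--                 break
--     return iguais
-- ===== SOURCE B (Python) =====
-- def saber_se_tem_letras_iguais(string):
--     return len(string) - len(set(string))
-- ===== Notes on version B (the rewrite author's own statement) =====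
-- stated objective: faster
-- what changed: Replaced the nested scan (for each position, scan the rest of the string for a repeat) by the closed form len(string) - len(set(string)): positions with a later duplicate are exactly the non-last occurrences, whose count is length minus the number of distinct characters.
import Mathlib
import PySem

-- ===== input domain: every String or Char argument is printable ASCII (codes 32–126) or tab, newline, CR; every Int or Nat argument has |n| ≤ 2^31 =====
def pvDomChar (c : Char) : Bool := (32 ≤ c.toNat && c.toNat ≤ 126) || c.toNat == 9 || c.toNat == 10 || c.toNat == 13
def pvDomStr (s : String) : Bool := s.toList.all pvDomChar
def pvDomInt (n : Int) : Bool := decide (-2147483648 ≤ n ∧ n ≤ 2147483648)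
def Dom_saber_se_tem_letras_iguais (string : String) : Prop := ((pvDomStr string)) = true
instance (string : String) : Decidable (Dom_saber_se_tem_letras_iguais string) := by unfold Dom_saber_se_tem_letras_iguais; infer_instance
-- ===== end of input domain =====

-- B replaces A's quadratic nested scan by the closed form len(string) - len(set(string)); return values proved equal.

-- ===== PORT A =====
-- inner 'for letra in nova_string: if letra == letra_setada: iguais += 1; break'
def pvInnerA (nova_string : List Char) (letra_setada : Char) (iguais : Int) : Int :=
  match nova_string with
  | [] => iguais
  | letra :: rest =>
      if letra = letra_setada then iguais + 1 else pvInnerA rest letra_setada iguais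

def saber_se_tem_letras_iguais (string : String) : Int :=
  let cs := string.toList
  (PySem.List.pyRange 0 (cs.length : Int) 1).foldl
    (fun iguais posicao =>
      let letra_setada := PySem.List.pyGetD cs posicao ' '
      let nova_string := PySem.List.slice cs (some (posicao + 1)) none
      pvInnerA nova_string letra_setada iguais) 0

-- ===== PORT B =====
def saber_se_tem_letras_iguais_alt (string : String) : Int :=
  PySem.Str.len string - ((PySem.Set.ofList string.toList).length : Int)

-- ===== PRECONDITION & SPEC =====
def Spec_saber_se_tem_letras_iguais (string : String) (out : Int) : Prop := out = saber_se_tem_letras_iguais_alt string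
instance (string : String) (out : Int) : Decidable (Spec_saber_se_tem_letras_iguais string out) := by unfold Spec_saber_se_tem_letras_iguais; infer_instance

-- ===== CLAIM (what is proved, stated in full; the proofs are below) =====
def Claim_equal_saber_se_tem_letras_iguais : Prop := ∀ (string : String), Dom_saber_se_tem_letras_iguais string → Spec_saber_se_tem_letras_iguais string (saber_se_tem_letras_iguais string)

-- ===== LEMMAS AND PROOFS =====

-- the inner break-loop adds 1 exactly when the letter occurs in the rest
theorem pvInnerA_eq (l : List Char) (c : Char) (i : Int) :
    pvInnerA l c i = if c ∈ l then i + 1 else i := by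
  induction l with
  | nil => simp [pvInnerA]
  | cons x t ih =>
      by_cases hx : c = x
      · simp [pvInnerA, hx]
      · simp [pvInnerA, Ne.symm hx, hx, ih]

-- number of positions with a later duplicate = length - number of distinct chars
def pvG (l : List Char) : Int := (l.length : Int) - (l.toFinset.card : Int)

theorem pvG_cons (c : Char) (t : List Char) :
    pvG (c :: t) = (if c ∈ t then 1 else 0) + pvG t := by
  unfold pvG
  have hle : t.toFinset.card ≤ t.length := t.toFinset_card_le
  by_cases h : c ∈ t
  · have : (c :: t).toFinset = t.toFinset := by
      simp [List.toFinset_cons, h]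
    rw [this]
    simp only [if_pos h, List.length_cons]
    push_cast; ring
  · have hni : c ∉ t.toFinset := by simpa using h
    rw [List.toFinset_cons, Finset.card_insert_of_notMem hni]
    simp only [if_neg h, List.length_cons]
    push_cast; ring

theorem pvLoop_eq (cs : List Char) (a : Nat) (acc : Int) (ha : a ≤ cs.length) :
    (PySem.List.pyRange (a : Int) (cs.length : Int) 1).foldl
      (fun iguais posicao =>
        pvInnerA (PySem.List.slice cs (some (posicao + 1)) none)
          (PySem.List.pyGetD cs posicao ' ') iguais) acc
    = acc + pvG (cs.drop a) := by
  by_cases h : a < cs.length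
  · rw [PySem.List.pyRange_one_cons (by exact_mod_cast h)]
    simp only [List.foldl_cons]
    have hstep : pvInnerA (PySem.List.slice cs (some ((a : Int) + 1)) none)
        (PySem.List.pyGetD cs (a : Int) ' ') acc
        = if cs[a] ∈ cs.drop (a + 1) then acc + 1 else acc := by
      have h1 : ((a : Int) + 1) = ((a + 1 : Nat) : Int) := by push_cast; ring
      rw [h1, PySem.List.slice_from_natCast, PySem.List.pyGetD_natCast, pvInnerA_eq]
      congr 1
      · simp [List.getD_eq_getElem?_getD, h]
    rw [hstep]
    have h2 : ((a : Int) + 1) = ((a + 1 : Nat) : Int) := by push_cast; ring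
    rw [h2, pvLoop_eq cs (a + 1) _ (by omega)]
    have hdrop : cs.drop a = cs[a] :: cs.drop (a + 1) := by
      exact (List.getElem_cons_drop h).symm
    rw [hdrop, pvG_cons]
    rcases Decidable.em (cs[a] ∈ cs.drop (a + 1)) with hm | hm <;> simp [hm, add_assoc]
  · rw [PySem.List.pyRange_one_eq_nil (by exact_mod_cast (by omega : cs.length ≤ a))]
    have : cs.drop a = [] := List.drop_eq_nil_of_le (by omega)
    simp [this, pvG]

theorem pvOfList_length (l : List Char) :
    (PySem.Set.ofList l).length = l.toFinset.card := by
  have hnd : (PySem.Set.ofList l).Nodup := PySem.Set.nodup_ofList l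
  have hfs : (PySem.Set.ofList l).toFinset = l.toFinset := by
    ext x; simp [PySem.Set.mem_ofList]
  calc (PySem.Set.ofList l).length = (PySem.Set.ofList l).toFinset.card :=
        (List.toFinset_card_of_nodup hnd).symm
    _ = l.toFinset.card := by rw [hfs]

-- ===== VERDICT (by name: the statement is the Claim_ definition above) =====
theorem saber_se_tem_letras_iguais_spec : Claim_equal_saber_se_tem_letras_iguais := by
  intro s _
  unfold Spec_saber_se_tem_letras_iguais saber_se_tem_letras_iguais saber_se_tem_letras_iguais_alt
  have h0 := pvLoop_eq s.toList 0 0 (by omega)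
  simp only [Nat.cast_zero] at h0
  rw [h0]
  simp [pvG, pvOfList_length, PySem.Str.len_eq]
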